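-- pv_equiv track=rewrite | github.com/sungyujeon/problem-solving | others/programmers/0909/2.py | dfs
-- ===== SOURCE A (Python) =====
-- direction = {
--     0: [0, 1],
--     1: [0, -1],
--     2: [1, 0],
--     3: [-1, 0]
-- }
--
-- def isInBound(_i, _j, ni2, nj2):
--     if (1 <= _i < ni2-1 and 1 <= _j < nj2-1):
--         return True
--     return False
--
-- def setNextIJ(ci, cj, k, ni2, nj2):
--     _d = direction[k]
--     ni = ci + _d[0]
--     nj = cj + _d[1]
--
--     if not isInBound(ni, nj, ni2, nj2):  # ni, nj가 범위 안이면
--         if k == 0: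
--             nj = 1
--         elif k == 1:
--             nj = nj2 - 2
--         elif k == 2:
--             ni = 1
--         else:
--             ni = ni2 - 2
--
--         return [ni, nj]
--     return [ni, nj]
--
-- def getDir(_i, _j, array, k):
--     _D = array[_i][_j]
--     nextK = 0
--
--     if _D == 'S':
--         nextK = k
--     elif _D == 'L':
--         if k == 0:
--             nextK = 3
--         elif k == 1:
--             nextK = 2
--         elif k == 2:
--             nextK = 0
--         else:
--             nextK = 1
--     else:
--         if k == 0:
--             nextK = 2
--         elif k == 1:
--             nextK = 3
--         elif k == 2:
--             nextK = 1
--         else: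
--             nextK = 0
--     return nextK
--
-- def dfs(ci, cj, k, ni2, nj2, array, outUsed, tmpOutUsed, res):
--     if tmpOutUsed[ci][cj][k]:
--         return res
--     else:
--         tmpOutUsed[ci][cj][k] = True
--         outUsed[ci][cj][k] = True
--
--         [ni, nj] = setNextIJ(ci, cj, k, ni2, nj2)
--
--         k = getDir(ni, nj, array, k)
--         return dfs(ni, nj, k, ni2, nj2, array, outUsed, tmpOutUsed, res+1)
-- ===== SOURCE B (Python) =====
-- # Pure simulation with a local visited set instead of A's tail recursion through
-- # the direction-dict helper chain: wrap-around moves become modular arithmetic,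
-- # turns become tuple lookups, and revisit detection uses the set, so B never
-- # mutates outUsed/tmpOutUsed (A marks them in place; the equivalence claimed
-- # here is about the RETURN value only).
--
-- _LEFT = (3, 2, 0, 1)
-- _RIGHT = (2, 3, 1, 0)
--
--
-- def dfs(ci, cj, k, ni2, nj2, array, outUsed, tmpOutUsed, res):
--     seen = set()
--     while not tmpOutUsed[ci][cj][k] and (ci, cj, k) not in seen:
--         seen.add((ci, cj, k))
--
--         if k == 0:
--             cj = cj % (nj2 - 2) + 1
--         elif k == 1:
--             cj = (cj - 2) % (nj2 - 2) + 1
--         elif k == 2: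
--             ci = ci % (ni2 - 2) + 1
--         else:
--             ci = (ci - 2) % (ni2 - 2) + 1
--
--         cell = array[ci][cj]
--         if cell == 'L':
--             k = _LEFT[k]
--         elif cell != 'S':
--             k = _RIGHT[k]
--
--         res += 1
--     return res
-- ===== Notes on version B (the rewrite author's own statement) =====
-- stated objective: alternative
-- what changed: Replaces the tail recursion through the direction dict and the isInBound/setNextIJ/getDir helper chain by a pure iterative simulation: revisits are detected with a local set of (i,j,k) states instead of mutating tmpOutUsed, the wrap-around move is one modular-arithmetic expression per direction and the turn a tuple lookup; B does not mutate outUsed/tmpOutUsed (A does), the return value is identical.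
import Mathlib
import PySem

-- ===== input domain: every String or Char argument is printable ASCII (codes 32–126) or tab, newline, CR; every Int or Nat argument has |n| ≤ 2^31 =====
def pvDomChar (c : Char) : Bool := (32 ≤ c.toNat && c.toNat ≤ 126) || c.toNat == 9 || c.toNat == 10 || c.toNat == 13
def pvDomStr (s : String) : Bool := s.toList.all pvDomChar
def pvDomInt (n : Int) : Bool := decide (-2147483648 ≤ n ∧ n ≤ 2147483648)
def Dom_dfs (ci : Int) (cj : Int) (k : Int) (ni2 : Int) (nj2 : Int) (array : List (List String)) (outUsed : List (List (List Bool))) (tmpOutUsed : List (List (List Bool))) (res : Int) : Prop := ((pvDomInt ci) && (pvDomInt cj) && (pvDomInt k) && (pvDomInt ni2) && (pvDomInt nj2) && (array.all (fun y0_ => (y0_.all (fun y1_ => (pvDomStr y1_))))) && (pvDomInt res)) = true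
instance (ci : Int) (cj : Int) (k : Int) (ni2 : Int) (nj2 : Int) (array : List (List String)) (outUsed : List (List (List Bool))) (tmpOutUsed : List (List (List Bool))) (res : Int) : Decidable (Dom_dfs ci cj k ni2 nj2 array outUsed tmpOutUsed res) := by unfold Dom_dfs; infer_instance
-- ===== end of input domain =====

-- B replaces A's tail recursion through the setNextIJ/getDir helper chain by a pure
-- iterative simulation: revisits are detected with a local set of (i,j,k) states, the
-- wrap-around move is modular arithmetic, the turn a list lookup.  A mutates
-- outUsed/tmpOutUsed in place and B does not: the equivalence proved here is about
-- the RETURN value only.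

-- Shared Python primitive: `t[i][j][k]` on the 3-level tables (`none` = IndexError);
-- both Python versions read exactly this subscript chain.  A additionally writes
-- `t[i][j][k] = v` (pvSet3?, used by port A only).
def pvGet3? (t : List (List (List Bool))) (i j k : Int) : Option Bool :=
  (PySem.List.pyGet? t i).bind fun row =>
    (PySem.List.pyGet? row j).bind fun cell =>
      PySem.List.pyGet? cell k

def pvSet3? (t : List (List (List Bool))) (i j k : Int) (v : Bool) : Option (List (List (List Bool))) :=
  (PySem.List.pyGet? t i).bind fun row =>
    (PySem.List.pyGet? row j).bind fun cell =>
      (PySem.List.pySet? cell k v).map fun cell' =>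
        PySem.List.pySetD t i (PySem.List.pySetD row j cell')

-- Count of False entries: port A's termination measure (each recursive step turns
-- one False cell of tmpOutUsed into True); port B derives its fuel bound from it.
def pvFc1 (r : List Bool) : Nat := (r.map fun b => if b then 0 else 1).sum
def pvFc2 (p : List (List Bool)) : Nat := (p.map pvFc1).sum
def pvFc3 (t : List (List (List Bool))) : Nat := (t.map pvFc2).sum

-- sum-after-set (used only for the termination measure; cited by decreasing_by)
theorem pvSum_map_set {α : Type} (f : α → Nat) (l : List α) (n : Nat) (x : α) (h : n < l.length) :
    ((l.set n x).map f).sum + f l[n] = (l.map f).sum + f x := by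
  induction l generalizing n with
  | nil => simp at h
  | cons a t ih =>
    cases n with
    | zero => simp [List.set]; omega
    | succ m =>
      simp only [List.set, List.map_cons, List.sum_cons, List.getElem_cons_succ]
      have := ih m (by simpa using h)
      omega

-- python index resolution: a successful read pins down the Nat index, and a write
-- at the same Int index is List.set at that Nat index
theorem pvResolve {α : Type} (xs : List α) (i : Int) (x : α)
    (h : PySem.List.pyGet? xs i = some x) :
    ∃ n : Nat, ∃ hn : n < xs.length, xs[n] = x ∧ (∀ v, PySem.List.pySetD xs i v = xs.set n v)
      ∧ (∀ v, PySem.List.pySet? xs i v = some (xs.set n v)) := by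
  unfold PySem.List.pyGet? at h
  cases hidx : PySem.List.pyIdx? xs.length i with
  | none => rw [hidx] at h; simp at h
  | some n =>
    rw [hidx] at h
    simp only [Option.bind_some] at h
    have hn : n < xs.length := by
      by_contra hge
      rw [List.getElem?_eq_none (by omega)] at h; simp at h
    refine ⟨n, hn, ?_, ?_, ?_⟩
    · have := List.getElem?_eq_getElem hn; rw [this] at h; exact (Option.some_inj.mp h)
    · intro v; unfold PySem.List.pySetD PySem.List.pySet?; rw [hidx]; rfl
    · intro v; unfold PySem.List.pySet?; rw [hidx]; rfl

-- setting a False cell of tmpOutUsed to True strictly decreases the measure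
theorem pvFc3_set (t t' : List (List (List Bool))) (i j k : Int)
    (h0 : pvGet3? t i j k = some false) (h1 : pvSet3? t i j k true = some t') :
    pvFc3 t' < pvFc3 t := by
  unfold pvGet3? at h0
  unfold pvSet3? at h1
  cases hrow : PySem.List.pyGet? t i with
  | none => rw [hrow] at h0; simp at h0
  | some row =>
  rw [hrow] at h0 h1
  simp only [Option.bind_some] at h0 h1
  cases hcell : PySem.List.pyGet? row j with
  | none => rw [hcell] at h0; simp at h0
  | some cell =>
  rw [hcell] at h0 h1
  simp only [Option.bind_some] at h0 h1
  obtain ⟨m, hm, hmv, _, hset⟩ := pvResolve cell k false h0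
  rw [hset true] at h1
  simp only [Option.map_some, Option.some_inj] at h1
  obtain ⟨nj, hnj, hnjv, hsetj, _⟩ := pvResolve row j cell hcell
  obtain ⟨ni, hni, hniv, hseti, _⟩ := pvResolve t i row hrow
  rw [hsetj, hseti] at h1
  subst h1
  have e1 : pvFc1 (cell.set m true) + (if cell[m] then 0 else 1) = pvFc1 cell + (if true then 0 else 1) :=
    pvSum_map_set _ cell m true hm
  rw [hmv] at e1
  have e2 : pvFc2 (row.set nj (cell.set m true)) + pvFc1 row[nj] = pvFc2 row + pvFc1 (cell.set m true) :=
    pvSum_map_set pvFc1 row nj _ hnj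
  rw [hnjv] at e2
  have e3 : pvFc3 (t.set ni (row.set nj (cell.set m true))) + pvFc2 t[ni] = pvFc3 t + pvFc2 (row.set nj (cell.set m true)) :=
    pvSum_map_set pvFc2 t ni _ hni
  rw [hniv] at e3
  simp at e1
  omega

-- ===== PORT A =====
-- direction = {0:[0,1], 1:[0,-1], 2:[1,0], 3:[-1,0]}
def direction : PySem.Dict Int (List Int) :=
  PySem.Dict.ofList [(0, [0, 1]), (1, [0, -1]), (2, [1, 0]), (3, [-1, 0])]

def isInBound (i j ni2 nj2 : Int) : Bool :=
  if 1 ≤ i ∧ i < ni2 - 1 ∧ 1 ≤ j ∧ j < nj2 - 1 then true else false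

-- returns the Python 2-list [ni, nj] as a pair; none = KeyError on direction[k]
def setNextIJ (ci cj k ni2 nj2 : Int) : Option (Int × Int) :=
  match PySem.Dict.get? direction k with
  | none => none
  | some d =>
    let ni := ci + PySem.List.pyGetD d 0 0
    let nj := cj + PySem.List.pyGetD d 1 0
    if !isInBound ni nj ni2 nj2 then
      if k == 0 then some (ni, 1)
      else if k == 1 then some (ni, nj2 - 2)
      else if k == 2 then some (1, nj)
      else some (ni2 - 2, nj)
    else some (ni, nj)

-- none = IndexError on array[i][j]
def getDir (i j : Int) (array : List (List String)) (k : Int) : Option Int :=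
  match PySem.List.pyGet? array i with
  | none => none
  | some r =>
    match PySem.List.pyGet? r j with
    | none => none
    | some D =>
      some (if D == "S" then k
            else if D == "L" then
              (if k == 0 then 3 else if k == 1 then 2 else if k == 2 then 0 else 1)
            else
              (if k == 0 then 2 else if k == 1 then 3 else if k == 2 then 1 else 0))

def dfs (ci : Int) (cj : Int) (k : Int) (ni2 : Int) (nj2 : Int) (array : List (List String)) (outUsed : List (List (List Bool))) (tmpOutUsed : List (List (List Bool))) (res : Int) : Int :=
  match h0 : pvGet3? tmpOutUsed ci cj k with
  | none => 0            -- IndexError reading tmpOutUsed[ci][cj][k] (outside Pre_)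
  | some true => res
  | some false =>
    match h1 : pvSet3? tmpOutUsed ci cj k true with
    | none => 0
    | some tmp' =>
      match pvSet3? outUsed ci cj k true with
      | none => 0        -- IndexError writing outUsed[ci][cj][k]
      | some out' =>
        match setNextIJ ci cj k ni2 nj2 with
        | none => 0      -- KeyError on direction[k]
        | some (ni, nj) =>
          match getDir ni nj array k with
          | none => 0    -- IndexError on array[ni][nj]
          | some k' => dfs ni nj k' ni2 nj2 array out' tmp' (res + 1)
termination_by pvFc3 tmpOutUsed
decreasing_by exact pvFc3_set _ _ _ _ _ h0 h1

-- ===== PORT B =====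
-- _LEFT = (3, 2, 0, 1);  _RIGHT = (2, 3, 1, 0)
def pvLeft : List Int := [3, 2, 0, 1]
def pvRight : List Int := [2, 3, 1, 0]

-- B's while-loop.  `fuel` is a totality guard only: each iteration reads `false` in
-- the unmutated table at a triple not yet in `seen`, each table cell has at most 8
-- aliasing Int index triples, so 8·(#False cells)+1 calls can never be exceeded.
def dfsAltGo (fuel : Nat) (seen : PySem.Set (Int × Int × Int)) (ci cj k ni2 nj2 : Int) (array : List (List String)) (tmpOutUsed : List (List (List Bool))) (res : Int) : Int :=
  match fuel with
  | 0 => 0               -- unreachable with the fuel dfs_alt supplies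
  | fuel + 1 =>
    match pvGet3? tmpOutUsed ci cj k with
    | none => 0          -- IndexError on the loop condition (outside Pre_)
    | some b =>
      if b then res
      else if PySem.Set.contains seen (ci, cj, k) then res
      else
        let seen' := PySem.Set.add seen (ci, cj, k)
        let p := if k == 0 then (ci, PySem.Int.mod cj (nj2 - 2) + 1)
                 else if k == 1 then (ci, PySem.Int.mod (cj - 2) (nj2 - 2) + 1)
                 else if k == 2 then (PySem.Int.mod ci (ni2 - 2) + 1, cj)
                 else (PySem.Int.mod (ci - 2) (ni2 - 2) + 1, cj)
        match (PySem.List.pyGet? array p.1).bind (fun r => PySem.List.pyGet? r p.2) with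
        | none => 0      -- IndexError on array[ci][cj]
        | some cell =>
          match (if cell == "L" then PySem.List.pyGet? pvLeft k
                 else if !(cell == "S") then PySem.List.pyGet? pvRight k
                 else some k) with
          | none => 0    -- IndexError on _LEFT[k]/_RIGHT[k]
          | some k' => dfsAltGo fuel seen' p.1 p.2 k' ni2 nj2 array tmpOutUsed (res + 1)

def dfs_alt (ci : Int) (cj : Int) (k : Int) (ni2 : Int) (nj2 : Int) (array : List (List String)) (outUsed : List (List (List Bool))) (tmpOutUsed : List (List (List Bool))) (res : Int) : Int :=
  dfsAltGo (8 * pvFc3 tmpOutUsed + 1) PySem.Set.empty ci cj k ni2 nj2 array tmpOutUsed res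

-- ===== PRECONDITION & SPEC =====
def pvShapeArr (ni2 nj2 : Int) (array : List (List String)) : Bool :=
  decide (ni2 - 1 ≤ (array.length : Int)) &&
    array.all fun r => decide (nj2 - 1 ≤ (r.length : Int))

def pvShape3 (ni2 nj2 : Int) (t : List (List (List Bool))) : Bool :=
  decide (ni2 - 1 ≤ (t.length : Int)) &&
    t.all fun p => decide (nj2 - 1 ≤ (p.length : Int)) && p.all fun r => decide (4 ≤ r.length)

def pvInv (ci cj k ni2 nj2 : Int) (array : List (List String)) (outUsed tmpOutUsed : List (List (List Bool))) : Bool :=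
  decide (3 ≤ ni2) && decide (3 ≤ nj2) &&
  decide (1 ≤ ci) && decide (ci ≤ ni2 - 2) && decide (1 ≤ cj) && decide (cj ≤ nj2 - 2) &&
  decide (0 ≤ k) && decide (k ≤ 3) &&
  pvShapeArr ni2 nj2 array && pvShape3 ni2 nj2 outUsed && pvShape3 ni2 nj2 tmpOutUsed

-- Pre_ admits (a) inputs whose starting cell tmpOutUsed[ci][cj][k] already holds True
-- (A returns res at once), and (b) walks started in the interior region 1..ni2-2 ×
-- 1..nj2-2 with 0 ≤ k ≤ 3 and array/outUsed/tmpOutUsed covering rows 0..ni2-2,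
-- columns 0..nj2-2 with ≥ 4 direction slots.  Excluded are the inputs on which A's
-- trajectory reaches an invalid index or key and raises (IndexError/KeyError), and
-- starts outside the interior or with ragged/short tables, where any value A happens
-- to return rests on Python's negative-index wraparound and leftover table state — an
-- accident of A's implementation that no caller of this contest helper relies on.
def Pre_dfs (ci : Int) (cj : Int) (k : Int) (ni2 : Int) (nj2 : Int) (array : List (List String)) (outUsed : List (List (List Bool))) (tmpOutUsed : List (List (List Bool))) (res : Int) : Prop :=
  pvGet3? tmpOutUsed ci cj k = some true ∨
    pvInv ci cj k ni2 nj2 array outUsed tmpOutUsed = true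

instance (ci : Int) (cj : Int) (k : Int) (ni2 : Int) (nj2 : Int) (array : List (List String)) (outUsed : List (List (List Bool))) (tmpOutUsed : List (List (List Bool))) (res : Int) : Decidable (Pre_dfs ci cj k ni2 nj2 array outUsed tmpOutUsed res) := by unfold Pre_dfs; infer_instance

def pvWitness_dfs : Int × Int × Int × Int × Int × List (List String) × List (List (List Bool)) × List (List (List Bool)) × Int :=
  (1, 1, 0, 3, 3,
   [["S", "S"], ["S", "L"]],
   [[[false, false, false, false], [false, false, false, false]],
    [[false, false, false, false], [false, false, false, false]]],
   [[[false, false, false, false], [false, false, false, false]],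
    [[false, false, false, false], [false, false, false, false]]],
   0)

def Spec_dfs (ci : Int) (cj : Int) (k : Int) (ni2 : Int) (nj2 : Int) (array : List (List String)) (outUsed : List (List (List Bool))) (tmpOutUsed : List (List (List Bool))) (res : Int) (out : Int) : Prop := out = dfs_alt ci cj k ni2 nj2 array outUsed tmpOutUsed res
instance (ci : Int) (cj : Int) (k : Int) (ni2 : Int) (nj2 : Int) (array : List (List String)) (outUsed : List (List (List Bool))) (tmpOutUsed : List (List (List Bool))) (res : Int) (out : Int) : Decidable (Spec_dfs ci cj k ni2 nj2 array outUsed tmpOutUsed res out) := by unfold Spec_dfs; infer_instance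

-- ===== CLAIM (what is proved, stated in full; the proofs are below) =====
def Claim_equal_dfs : Prop := ∀ (ci : Int) (cj : Int) (k : Int) (ni2 : Int) (nj2 : Int) (array : List (List String)) (outUsed : List (List (List Bool))) (tmpOutUsed : List (List (List Bool))) (res : Int), Dom_dfs ci cj k ni2 nj2 array outUsed tmpOutUsed res → Pre_dfs ci cj k ni2 nj2 array outUsed tmpOutUsed res → Spec_dfs ci cj k ni2 nj2 array outUsed tmpOutUsed res (dfs ci cj k ni2 nj2 array outUsed tmpOutUsed res)

-- ===== LEMMAS AND PROOFS =====

-- shape is preserved by an in-place cell update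
theorem pvShape3_set (ni2 nj2 : Int) (t : List (List (List Bool))) (row : List (List Bool))
    (cell : List Bool) (a b c : Nat) (v : Bool) (hs : pvShape3 ni2 nj2 t = true)
    (hrow : row ∈ t) (hcell : cell ∈ row) :
    pvShape3 ni2 nj2 (t.set a (row.set b (cell.set c v))) = true := by
  simp only [pvShape3, Bool.and_eq_true, decide_eq_true_eq, List.all_eq_true] at hs ⊢
  obtain ⟨hlen, hall⟩ := hs
  refine ⟨by simpa using hlen, ?_⟩
  intro p hp
  rcases List.mem_or_eq_of_mem_set hp with hp | hp
  · exact hall p hp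
  · subst hp
    obtain ⟨hrl, hrall⟩ := hall row hrow
    refine ⟨by simpa using hrl, ?_⟩
    intro r hr
    rcases List.mem_or_eq_of_mem_set hr with hr | hr
    · exact hrall r hr
    · subst hr
      simpa using hrall cell hcell

-- in the interior region, the 3-level read and write both succeed and keep the shape
theorem pvAccess (ni2 nj2 : Int) (t : List (List (List Bool))) (i j k : Int) (v : Bool)
    (hs : pvShape3 ni2 nj2 t = true)
    (hi1 : 1 ≤ i) (hi2 : i ≤ ni2 - 2) (hj1 : 1 ≤ j) (hj2 : j ≤ nj2 - 2)
    (hk1 : 0 ≤ k) (hk2 : k ≤ 3) :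
    ∃ b t', pvGet3? t i j k = some b ∧ pvSet3? t i j k v = some t' ∧
      pvShape3 ni2 nj2 t' = true := by
  have hs' := hs
  simp only [pvShape3, Bool.and_eq_true, decide_eq_true_eq, List.all_eq_true] at hs'
  obtain ⟨hlen, hall⟩ := hs'
  obtain ⟨row, hget1, hrowmem⟩ : ∃ row, PySem.List.pyGet? t i = some row ∧ row ∈ t :=
    ⟨t[i.toNat], PySem.List.pyGet?_eq_some_getElem t (by omega) (by omega),
      List.getElem_mem _⟩
  obtain ⟨hrl, hrall⟩ := hall row hrowmem
  obtain ⟨cell, hget2, hcellmem⟩ : ∃ cell, PySem.List.pyGet? row j = some cell ∧ cell ∈ row :=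
    ⟨row[j.toNat], PySem.List.pyGet?_eq_some_getElem row (by omega) (by omega),
      List.getElem_mem _⟩
  have hcl := hrall cell hcellmem
  obtain ⟨b, hget3⟩ : ∃ b, PySem.List.pyGet? cell k = some b :=
    ⟨cell[k.toNat], PySem.List.pyGet?_eq_some_getElem cell (by omega) (by omega)⟩
  obtain ⟨m, hm, _, _, hset3⟩ := pvResolve cell k _ hget3
  obtain ⟨nj', hnj', _, hsetj, _⟩ := pvResolve row j _ hget2
  obtain ⟨ni', hni', _, hseti, _⟩ := pvResolve t i _ hget1
  refine ⟨b, t.set ni' (row.set nj' (cell.set m v)), ?_, ?_, ?_⟩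
  · unfold pvGet3?
    rw [hget1, Option.bind_some, hget2, Option.bind_some, hget3]
  · unfold pvSet3?
    rw [hget1, Option.bind_some, hget2, Option.bind_some, hset3 v]
    simp only [Option.map_some, Option.some_inj]
    rw [hsetj, hseti]
  · exact pvShape3_set ni2 nj2 t row cell ni' nj' m v hs hrowmem hcellmem

-- reads with nonnegative indices are plain getElem? chains
theorem pvGet3?_nonneg (t : List (List (List Bool))) (i j k : Int) (hi : 0 ≤ i) (hj : 0 ≤ j) (hk : 0 ≤ k) :
    pvGet3? t i j k = (t[i.toNat]?).bind (fun row => (row[j.toNat]?).bind fun cell => cell[k.toNat]?) := by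
  simp only [pvGet3?, PySem.List.pyGet?_of_nonneg _ hi, PySem.List.pyGet?_of_nonneg _ hj,
    PySem.List.pyGet?_of_nonneg _ hk]

-- a write at an interior triple changes exactly that triple's read (on nonneg indices)
theorem pvWriteChar (ni2 nj2 : Int) (t t' : List (List (List Bool))) (ci cj k : Int)
    (hs : pvShape3 ni2 nj2 t = true) (hni2 : 3 ≤ ni2) (hnj2 : 3 ≤ nj2)
    (hci1 : 1 ≤ ci) (hci2 : ci ≤ ni2 - 2) (hcj1 : 1 ≤ cj) (hcj2 : cj ≤ nj2 - 2)
    (hk1 : 0 ≤ k) (hk2 : k ≤ 3)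
    (hset : pvSet3? t ci cj k true = some t')
    (i j k3 : Int) (hi : 0 ≤ i) (hj : 0 ≤ j) (hk3 : 0 ≤ k3) :
    pvGet3? t' i j k3 = if i = ci ∧ j = cj ∧ k3 = k then some true else pvGet3? t i j k3 := by
  have hs' := hs
  simp only [pvShape3, Bool.and_eq_true, decide_eq_true_eq, List.all_eq_true] at hs'
  obtain ⟨hlen, hall⟩ := hs'
  have ha : ci.toNat < t.length := by omega
  have hrowmem : t[ci.toNat] ∈ t := List.getElem_mem _
  obtain ⟨hrl, hrall⟩ := hall _ hrowmem
  have hb : cj.toNat < t[ci.toNat].length := by omega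
  have hcellmem : t[ci.toNat][cj.toNat] ∈ t[ci.toNat] := List.getElem_mem _
  have hcl := hrall _ hcellmem
  have hc : k.toNat < t[ci.toNat][cj.toNat].length := by omega
  have hrow : PySem.List.pyGet? t ci = some t[ci.toNat] :=
    PySem.List.pyGet?_eq_some_getElem t (by omega) (by omega)
  have hcell : PySem.List.pyGet? t[ci.toNat] cj = some t[ci.toNat][cj.toNat] :=
    PySem.List.pyGet?_eq_some_getElem _ (by omega) (by omega)
  have hput : PySem.List.pySet? t[ci.toNat][cj.toNat] k true
      = some (t[ci.toNat][cj.toNat].set k.toNat true) := by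
    have h := PySem.List.pySet?_natCast t[ci.toNat][cj.toNat] k.toNat true hc
    rwa [Int.toNat_of_nonneg hk1] at h
  have ht' : t' = t.set ci.toNat (t[ci.toNat].set cj.toNat (t[ci.toNat][cj.toNat].set k.toNat true)) := by
    unfold pvSet3? at hset
    rw [hrow, Option.bind_some, hcell, Option.bind_some, hput] at hset
    simp only [Option.map_some, Option.some_inj] at hset
    rw [PySem.List.pySetD_of_nonneg _ _ (show (0:Int) ≤ cj by omega),
        PySem.List.pySetD_of_nonneg _ _ (show (0:Int) ≤ ci by omega)] at hset
    exact hset.symm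
  subst ht'
  rw [pvGet3?_nonneg _ _ _ _ hi hj hk3, pvGet3?_nonneg _ _ _ _ hi hj hk3,
      List.getElem?_set]
  by_cases hic : i = ci
  · have hicn : ci.toNat = i.toNat := by omega
    rw [if_pos hicn, if_pos (by omega : ci.toNat < t.length)]
    have hra : t[i.toNat]? = some t[ci.toNat] := by
      rw [← hicn]; exact List.getElem?_eq_getElem ha
    rw [hra]
    simp only [Option.bind_some, List.getElem?_set]
    by_cases hjc : j = cj
    · have hjcn : cj.toNat = j.toNat := by omega
      rw [if_pos hjcn, if_pos (by omega : cj.toNat < t[ci.toNat].length)]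
      have hrb : t[ci.toNat][j.toNat]? = some t[ci.toNat][cj.toNat] := by
        rw [← hjcn]; exact List.getElem?_eq_getElem hb
      rw [hrb]
      simp only [Option.bind_some, List.getElem?_set]
      by_cases hkc : k3 = k
      · rw [if_pos (by omega : k.toNat = k3.toNat),
            if_pos (by omega : k.toNat < t[ci.toNat][cj.toNat].length),
            if_pos ⟨hic, hjc, hkc⟩]
      · rw [if_neg (by omega : ¬ k.toNat = k3.toNat),
            if_neg (fun h => hkc h.2.2)]
    · rw [if_neg (by omega : ¬ cj.toNat = j.toNat), if_neg (fun h => hjc h.2.1)]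
  · rw [if_neg (by omega : ¬ ci.toNat = i.toNat), if_neg (fun h => hic h.1)]

-- one-step unfolding of port A on an unvisited cell
theorem pvDfs_step (ci cj k ni2 nj2 : Int) (array : List (List String))
    (outUsed tmpOutUsed tmp' out' : List (List (List Bool))) (res ni nj k' : Int)
    (h0 : pvGet3? tmpOutUsed ci cj k = some false)
    (h1 : pvSet3? tmpOutUsed ci cj k true = some tmp')
    (h2 : pvSet3? outUsed ci cj k true = some out')
    (h3 : setNextIJ ci cj k ni2 nj2 = some (ni, nj))
    (h4 : getDir ni nj array k = some k') :
    dfs ci cj k ni2 nj2 array outUsed tmpOutUsed res = dfs ni nj k' ni2 nj2 array out' tmp' (res + 1) := by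
  rw [dfs.eq_def]
  repeat (split <;> simp_all)

-- unfoldings of port B's loop
theorem pvAltGo_true (fuel : Nat) (seen : PySem.Set (Int × Int × Int)) (ci cj k ni2 nj2 : Int)
    (array : List (List String)) (T0 : List (List (List Bool))) (res : Int) (b : Bool)
    (h0 : pvGet3? T0 ci cj k = some b)
    (hb : b = true ∨ (ci, cj, k) ∈ seen) :
    dfsAltGo (fuel + 1) seen ci cj k ni2 nj2 array T0 res = res := by
  cases b with
  | true => simp [dfsAltGo, h0]
  | false =>
    have hmem : (ci, cj, k) ∈ seen := by
      rcases hb with h | h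
      · simp at h
      · exact h
    simp [dfsAltGo, h0, hmem]

theorem pvAltGo_step (fuel : Nat) (seen : PySem.Set (Int × Int × Int)) (ci cj k ni2 nj2 : Int)
    (array : List (List String)) (T0 : List (List (List Bool))) (res ni nj k' : Int) (cell : String)
    (h0 : pvGet3? T0 ci cj k = some false)
    (hmem : (ci, cj, k) ∉ seen)
    (hp : (if k == 0 then (ci, PySem.Int.mod cj (nj2 - 2) + 1)
           else if k == 1 then (ci, PySem.Int.mod (cj - 2) (nj2 - 2) + 1)
           else if k == 2 then (PySem.Int.mod ci (ni2 - 2) + 1, cj)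
           else (PySem.Int.mod (ci - 2) (ni2 - 2) + 1, cj)) = (ni, nj))
    (h3 : (PySem.List.pyGet? array ni).bind (fun r => PySem.List.pyGet? r nj) = some cell)
    (h4 : (if cell == "L" then PySem.List.pyGet? pvLeft k
           else if !(cell == "S") then PySem.List.pyGet? pvRight k
           else some k) = some k') :
    dfsAltGo (fuel + 1) seen ci cj k ni2 nj2 array T0 res
      = dfsAltGo fuel (PySem.Set.add seen (ci, cj, k)) ni nj k' ni2 nj2 array T0 (res + 1) := by
  have hcont : PySem.Set.contains seen (ci, cj, k) = false := by
    by_contra h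
    exact hmem ((PySem.Set.contains_iff seen (ci, cj, k)).mp (by
      cases hc : PySem.Set.contains seen (ci, cj, k) with
      | true => rfl
      | false => exact absurd hc h))
  rw [dfsAltGo.eq_def]
  simp only [h0, Bool.false_eq_true, if_false, hcont, hp]
  rw [h3]
  simp only [h4]

-- the A-side step (setNextIJ + getDir) agrees with B's closed-form step
set_option maxHeartbeats 1600000 in
theorem pvStepAgree (ci cj k ni2 nj2 : Int) (array : List (List String))
    (hni2 : 3 ≤ ni2) (hnj2 : 3 ≤ nj2)
    (hci1 : 1 ≤ ci) (hci2 : ci ≤ ni2 - 2) (hcj1 : 1 ≤ cj) (hcj2 : cj ≤ nj2 - 2)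
    (hk : k = 0 ∨ k = 1 ∨ k = 2 ∨ k = 3)
    (hsa : pvShapeArr ni2 nj2 array = true) :
    ∃ ni nj cell k',
      setNextIJ ci cj k ni2 nj2 = some (ni, nj) ∧
      (if k == 0 then (ci, PySem.Int.mod cj (nj2 - 2) + 1)
       else if k == 1 then (ci, PySem.Int.mod (cj - 2) (nj2 - 2) + 1)
       else if k == 2 then (PySem.Int.mod ci (ni2 - 2) + 1, cj)
       else (PySem.Int.mod (ci - 2) (ni2 - 2) + 1, cj)) = (ni, nj) ∧
      1 ≤ ni ∧ ni ≤ ni2 - 2 ∧ 1 ≤ nj ∧ nj ≤ nj2 - 2 ∧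
      (PySem.List.pyGet? array ni).bind (fun r => PySem.List.pyGet? r nj) = some cell ∧
      getDir ni nj array k = some k' ∧
      (if cell == "L" then PySem.List.pyGet? pvLeft k
       else if !(cell == "S") then PySem.List.pyGet? pvRight k
       else some k) = some k' ∧
      (k' = 0 ∨ k' = 1 ∨ k' = 2 ∨ k' = 3) := by
  simp only [pvShapeArr, Bool.and_eq_true, decide_eq_true_eq, List.all_eq_true] at hsa
  obtain ⟨hal, harall⟩ := hsa
  have hcoords : ∃ ni nj,
      setNextIJ ci cj k ni2 nj2 = some (ni, nj) ∧
      (if k == 0 then (ci, PySem.Int.mod cj (nj2 - 2) + 1)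
       else if k == 1 then (ci, PySem.Int.mod (cj - 2) (nj2 - 2) + 1)
       else if k == 2 then (PySem.Int.mod ci (ni2 - 2) + 1, cj)
       else (PySem.Int.mod (ci - 2) (ni2 - 2) + 1, cj)) = (ni, nj) ∧
      1 ≤ ni ∧ ni ≤ ni2 - 2 ∧ 1 ≤ nj ∧ nj ≤ nj2 - 2 := by
    have e0 : PySem.Dict.get? direction 0 = some [0, 1] := by decide
    have e1 : PySem.Dict.get? direction 1 = some [0, -1] := by decide
    have e2 : PySem.Dict.get? direction 2 = some [1, 0] := by decide
    have e3 : PySem.Dict.get? direction 3 = some [-1, 0] := by decide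
    have hmj : 0 < nj2 - 2 := by omega
    have hmi : 0 < ni2 - 2 := by omega
    have g01a : PySem.List.pyGetD ([0, 1] : List Int) 0 0 = 0 := by decide
    have g01b : PySem.List.pyGetD ([0, 1] : List Int) 1 0 = 1 := by decide
    have g0m1a : PySem.List.pyGetD ([0, -1] : List Int) 0 0 = 0 := by decide
    have g0m1b : PySem.List.pyGetD ([0, -1] : List Int) 1 0 = -1 := by decide
    have g10a : PySem.List.pyGetD ([1, 0] : List Int) 0 0 = 1 := by decide
    have g10b : PySem.List.pyGetD ([1, 0] : List Int) 1 0 = 0 := by decide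
    have gm10a : PySem.List.pyGetD ([-1, 0] : List Int) 0 0 = -1 := by decide
    have gm10b : PySem.List.pyGetD ([-1, 0] : List Int) 1 0 = 0 := by decide
    rcases hk with rfl | rfl | rfl | rfl
    · by_cases hlt : cj < nj2 - 2
      · have hm' : cj % (nj2 - 2) = cj := Int.emod_eq_of_lt (by omega) (by omega)
        refine ⟨ci, cj + 1, ?_, ?_, by omega, by omega, by omega, by omega⟩
        · unfold setNextIJ
          rw [e0]
          dsimp only
          rw [g01a, g01b]
          have hIB : isInBound (ci + 0) (cj + 1) ni2 nj2 = true := by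
            unfold isInBound
            split_ifs with h
            · rfl
            · exact absurd ⟨by omega, by omega, by omega, by omega⟩ h
          rw [hIB]
          norm_num
          try omega
        · rw [PySem.Int.mod_eq_emod_of_pos (a := cj) hmj, hm']
          norm_num
          try omega
      · have hcj : cj = nj2 - 2 := by omega
        have hm' : cj % (nj2 - 2) = 0 := by rw [hcj, Int.emod_self]
        refine ⟨ci, 1, ?_, ?_, by omega, by omega, by omega, by omega⟩
        · unfold setNextIJ
          rw [e0]
          dsimp only
          rw [g01a, g01b]
          have hIB : isInBound (ci + 0) (cj + 1) ni2 nj2 = false := by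
            unfold isInBound
            split_ifs with h
            · exfalso; omega
            · rfl
          rw [hIB]
          norm_num
          try omega
        · rw [PySem.Int.mod_eq_emod_of_pos (a := cj) hmj, hm']
          norm_num
          try omega
    · by_cases hlt : 2 ≤ cj
      · have hm' : (cj - 2) % (nj2 - 2) = cj - 2 := Int.emod_eq_of_lt (by omega) (by omega)
        refine ⟨ci, cj - 1, ?_, ?_, by omega, by omega, by omega, by omega⟩
        · unfold setNextIJ
          rw [e1]
          dsimp only
          rw [g0m1a, g0m1b]
          have hIB : isInBound (ci + 0) (cj + -1) ni2 nj2 = true := by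
            unfold isInBound
            split_ifs with h
            · rfl
            · exact absurd ⟨by omega, by omega, by omega, by omega⟩ h
          rw [hIB]
          norm_num
          try omega
        · rw [PySem.Int.mod_eq_emod_of_pos (a := cj - 2) hmj, hm']
          norm_num
          try omega
      · have hcj : cj = 1 := by omega
        have hm' : (cj - 2) % (nj2 - 2) = nj2 - 3 := by
          have h1 : cj - 2 = -1 := by omega
          have h2 : (-1 : Int) % (nj2 - 2) = (-1 + (nj2 - 2) * 1) % (nj2 - 2) :=
            (Int.add_mul_emod_self_left (a := -1) (b := nj2 - 2) (c := 1)).symm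
          have h3 : (-1 + (nj2 - 2) * 1) % (nj2 - 2) = nj2 - 3 := by
            rw [mul_one, Int.emod_eq_of_lt (by omega) (by omega)]; omega
          rw [h1, h2, h3]
        refine ⟨ci, nj2 - 2, ?_, ?_, by omega, by omega, by omega, by omega⟩
        · unfold setNextIJ
          rw [e1]
          dsimp only
          rw [g0m1a, g0m1b]
          have hIB : isInBound (ci + 0) (cj + -1) ni2 nj2 = false := by
            unfold isInBound
            split_ifs with h
            · exfalso; omega
            · rfl
          rw [hIB]
          norm_num
          try omega
        · rw [PySem.Int.mod_eq_emod_of_pos (a := cj - 2) hmj, hm']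
          norm_num
          try omega
    · by_cases hlt : ci < ni2 - 2
      · have hm' : ci % (ni2 - 2) = ci := Int.emod_eq_of_lt (by omega) (by omega)
        refine ⟨ci + 1, cj, ?_, ?_, by omega, by omega, by omega, by omega⟩
        · unfold setNextIJ
          rw [e2]
          dsimp only
          rw [g10a, g10b]
          have hIB : isInBound (ci + 1) (cj + 0) ni2 nj2 = true := by
            unfold isInBound
            split_ifs with h
            · rfl
            · exact absurd ⟨by omega, by omega, by omega, by omega⟩ h
          rw [hIB]
          norm_num
          try omega
        · rw [PySem.Int.mod_eq_emod_of_pos (a := ci) hmi, hm']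
          norm_num
          try omega
      · have hci : ci = ni2 - 2 := by omega
        have hm' : ci % (ni2 - 2) = 0 := by rw [hci, Int.emod_self]
        refine ⟨1, cj, ?_, ?_, by omega, by omega, by omega, by omega⟩
        · unfold setNextIJ
          rw [e2]
          dsimp only
          rw [g10a, g10b]
          have hIB : isInBound (ci + 1) (cj + 0) ni2 nj2 = false := by
            unfold isInBound
            split_ifs with h
            · exfalso; omega
            · rfl
          rw [hIB]
          norm_num
          try omega
        · rw [PySem.Int.mod_eq_emod_of_pos (a := ci) hmi, hm']
          norm_num
          try omega
    · by_cases hlt : 2 ≤ ci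
      · have hm' : (ci - 2) % (ni2 - 2) = ci - 2 := Int.emod_eq_of_lt (by omega) (by omega)
        refine ⟨ci - 1, cj, ?_, ?_, by omega, by omega, by omega, by omega⟩
        · unfold setNextIJ
          rw [e3]
          dsimp only
          rw [gm10a, gm10b]
          have hIB : isInBound (ci + -1) (cj + 0) ni2 nj2 = true := by
            unfold isInBound
            split_ifs with h
            · rfl
            · exact absurd ⟨by omega, by omega, by omega, by omega⟩ h
          rw [hIB]
          norm_num
          try omega
        · rw [PySem.Int.mod_eq_emod_of_pos (a := ci - 2) hmi, hm']
          norm_num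
          try omega
      · have hci : ci = 1 := by omega
        have hm' : (ci - 2) % (ni2 - 2) = ni2 - 3 := by
          have h1 : ci - 2 = -1 := by omega
          have h2 : (-1 : Int) % (ni2 - 2) = (-1 + (ni2 - 2) * 1) % (ni2 - 2) :=
            (Int.add_mul_emod_self_left (a := -1) (b := ni2 - 2) (c := 1)).symm
          have h3 : (-1 + (ni2 - 2) * 1) % (ni2 - 2) = ni2 - 3 := by
            rw [mul_one, Int.emod_eq_of_lt (by omega) (by omega)]; omega
          rw [h1, h2, h3]
        refine ⟨ni2 - 2, cj, ?_, ?_, by omega, by omega, by omega, by omega⟩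
        · unfold setNextIJ
          rw [e3]
          dsimp only
          rw [gm10a, gm10b]
          have hIB : isInBound (ci + -1) (cj + 0) ni2 nj2 = false := by
            unfold isInBound
            split_ifs with h
            · exfalso; omega
            · rfl
          rw [hIB]
          norm_num
          try omega
        · rw [PySem.Int.mod_eq_emod_of_pos (a := ci - 2) hmi, hm']
          norm_num
          try omega
  obtain ⟨ni, nj, hsn, hbp, hni1, hni2', hnj1, hnj2'⟩ := hcoords
  have hnia : ni.toNat < array.length := by omega
  have hrow : PySem.List.pyGet? array ni = some array[ni.toNat] :=
    PySem.List.pyGet?_eq_some_getElem array (by omega) (by omega)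
  have hrmem : array[ni.toNat] ∈ array := List.getElem_mem hnia
  have hrl := harall _ hrmem
  obtain ⟨D, hD⟩ : ∃ D, array[ni.toNat][nj.toNat] = D := ⟨_, rfl⟩
  have hcell : PySem.List.pyGet? array[ni.toNat] nj = some D := by
    rw [← hD]
    exact PySem.List.pyGet?_eq_some_getElem _ (by omega) (by omega)
  refine ⟨ni, nj, D,
    (if D == "S" then k
     else if D == "L" then
       (if k == 0 then 3 else if k == 1 then 2 else if k == 2 then 0 else 1)
     else
       (if k == 0 then 2 else if k == 1 then 3 else if k == 2 then 1 else 0)),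
    hsn, hbp, hni1, hni2', hnj1, hnj2', ?_, ?_, ?_, ?_⟩
  · rw [hrow, Option.bind_some, hcell]
  · unfold getDir
    rw [hrow]
    dsimp only
    rw [hcell]
  · by_cases hL : D == "L"
    · simp only [beq_iff_eq] at hL
      subst hL
      rcases hk with rfl | rfl | rfl | rfl <;> decide
    · by_cases hS : D == "S"
      · simp only [beq_iff_eq] at hS
        subst hS
        simp
      · simp only [Bool.not_eq_true] at hS hL
        simp only [hS, hL, Bool.false_eq_true, if_false, Bool.not_false, if_true]
        rcases hk with rfl | rfl | rfl | rfl <;> decide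
  · by_cases hS : D == "S"
    · simp only [hS, if_true]
      omega
    · by_cases hL : D == "L"
      · simp only [Bool.not_eq_true] at hS
        simp only [hS, hL, Bool.false_eq_true, if_false, if_true]
        rcases hk with rfl | rfl | rfl | rfl <;> norm_num
      · simp only [Bool.not_eq_true] at hS hL
        simp only [hS, hL, Bool.false_eq_true, if_false]
        rcases hk with rfl | rfl | rfl | rfl <;> norm_num

-- A on an already-visited starting cell
theorem pvDfsA_true (ci cj k ni2 nj2 : Int) (array : List (List String))
    (outUsed tmpOutUsed : List (List (List Bool))) (res : Int)
    (h : pvGet3? tmpOutUsed ci cj k = some true) :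
    dfs ci cj k ni2 nj2 array outUsed tmpOutUsed res = res := by
  rw [dfs.eq_def]
  split <;> simp_all

-- the main loop correspondence: A's recursion on the mutated table tracks B's
-- loop over the visited set and the unmutated table T0
theorem pvLoopAgree : ∀ (fuel : Nat) (ci cj k : Int) (array : List (List String))
    (outU tmpU T0 : List (List (List Bool))) (seen : PySem.Set (Int × Int × Int))
    (res ni2 nj2 : Int),
    pvInv ci cj k ni2 nj2 array outU tmpU = true →
    pvShape3 ni2 nj2 T0 = true →
    (∀ i j k3 : Int, 1 ≤ i → i ≤ ni2 - 2 → 1 ≤ j → j ≤ nj2 - 2 → 0 ≤ k3 → k3 ≤ 3 →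
       (pvGet3? tmpU i j k3 = some true ↔
         (pvGet3? T0 i j k3 = some true ∨ (i, j, k3) ∈ seen))) →
    pvFc3 tmpU + 1 ≤ fuel →
    dfs ci cj k ni2 nj2 array outU tmpU res = dfsAltGo fuel seen ci cj k ni2 nj2 array T0 res := by
  intro fuel
  induction fuel with
  | zero =>
    intro _ _ _ _ _ _ _ _ _ _ _ _ _ _ hfuel
    omega
  | succ fuel ih =>
    intro ci cj k array outU tmpU T0 seen res ni2 nj2 hinv hT0 hrel hfuel
    obtain ⟨⟨⟨⟨⟨⟨⟨⟨⟨⟨hni2, hnj2⟩, hci1⟩, hci2⟩, hcj1⟩, hcj2⟩, hk0⟩, hk3⟩, hsa⟩, hso⟩, hst⟩ :=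
      by simpa only [pvInv, Bool.and_eq_true, decide_eq_true_eq] using hinv
    obtain ⟨b, tmp', hget, hset, hst'⟩ :=
      pvAccess ni2 nj2 tmpU ci cj k true hst hci1 hci2 hcj1 hcj2 hk0 hk3
    obtain ⟨b0, _, hget0, _, _⟩ :=
      pvAccess ni2 nj2 T0 ci cj k true hT0 hci1 hci2 hcj1 hcj2 hk0 hk3
    have hiff := hrel ci cj k hci1 hci2 hcj1 hcj2 hk0 hk3
    rw [hget, hget0] at hiff
    cases b with
    | true =>
      rw [pvDfsA_true ci cj k ni2 nj2 array outU tmpU res hget]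
      rw [pvAltGo_true fuel seen ci cj k ni2 nj2 array T0 res b0 hget0 (by
        rcases hiff.mp rfl with h | h
        · exact Or.inl (Option.some_inj.mp h)
        · exact Or.inr h)]
    | false =>
      have hb0 : b0 = false := by
        cases b0 with
        | false => rfl
        | true =>
          have := hiff.mpr (Or.inl rfl)
          simp at this
      subst hb0
      have hmem : (ci, cj, k) ∉ seen := fun h => by
        have := hiff.mpr (Or.inr h)
        simp at this
      obtain ⟨_, out', _, hseto, hso'⟩ :=
        pvAccess ni2 nj2 outU ci cj k true hso hci1 hci2 hcj1 hcj2 hk0 hk3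
      have hk : k = 0 ∨ k = 1 ∨ k = 2 ∨ k = 3 := by omega
      obtain ⟨ni, nj, cell, k', hsn, hbp, hni1, hni2', hnj1, hnj2', hcellg, hgd, hbd, hk'⟩ :=
        pvStepAgree ci cj k ni2 nj2 array hni2 hnj2 hci1 hci2 hcj1 hcj2 hk hsa
      rw [pvDfs_step ci cj k ni2 nj2 array outU tmpU tmp' out' res ni nj k'
            hget hset hseto hsn hgd,
          pvAltGo_step fuel seen ci cj k ni2 nj2 array T0 res ni nj k' cell
            hget0 hmem hbp hcellg hbd]
      have hdec := pvFc3_set tmpU tmp' ci cj k hget hset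
      apply ih
      · simp only [pvInv, Bool.and_eq_true, decide_eq_true_eq]
        exact ⟨⟨⟨⟨⟨⟨⟨⟨⟨⟨hni2, hnj2⟩, hni1⟩, hni2'⟩, hnj1⟩, hnj2'⟩, by omega⟩, by omega⟩, hsa⟩, hso'⟩, hst'⟩
      · exact hT0
      · intro i j k3 hi1 hi2 hj1 hj2 hkk0 hkk3
        have hw := pvWriteChar ni2 nj2 tmpU tmp' ci cj k hst hni2 hnj2 hci1 hci2 hcj1 hcj2
          hk0 hk3 hset i j k3 (by omega) (by omega) (by omega)
        rw [hw]
        by_cases heq : i = ci ∧ j = cj ∧ k3 = k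
        · rw [if_pos heq]
          obtain ⟨rfl, rfl, rfl⟩ := heq
          constructor
          · intro _
            exact Or.inr ((PySem.Set.mem_add seen (i, j, k3) (i, j, k3)).mpr (Or.inr rfl))
          · intro _; rfl
        · rw [if_neg heq]
          rw [hrel i j k3 hi1 hi2 hj1 hj2 hkk0 hkk3]
          constructor
          · rintro (h | h)
            · exact Or.inl h
            · exact Or.inr ((PySem.Set.mem_add seen (ci, cj, k) (i, j, k3)).mpr (Or.inl h))
          · rintro (h | h)
            · exact Or.inl h
            · rcases (PySem.Set.mem_add seen (ci, cj, k) (i, j, k3)).mp h with h' | h'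
              · exact Or.inr h'
              · exfalso
                apply heq
                simp only [Prod.ext_iff] at h'
                exact ⟨h'.1, h'.2.1, h'.2.2⟩
      · omega

-- ===== VERDICT (by name: the statement is the Claim_ definition above) =====
theorem dfs_spec : Claim_equal_dfs := by
  intro ci cj k ni2 nj2 array outUsed tmpOutUsed res _ hpre
  unfold Spec_dfs dfs_alt
  rcases hpre with h | h
  · rw [pvDfsA_true ci cj k ni2 nj2 array outUsed tmpOutUsed res h]
    rw [pvAltGo_true (8 * pvFc3 tmpOutUsed) PySem.Set.empty ci cj k ni2 nj2 array
      tmpOutUsed res true h (Or.inl rfl)]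
  · apply pvLoopAgree
    · exact h
    · have := by simpa only [pvInv, Bool.and_eq_true, decide_eq_true_eq] using h
      exact this.2
    · intro i j k3 _ _ _ _ _ _
      constructor
      · exact Or.inl
      · rintro (hh | hh)
        · exact hh
        · exact absurd hh (List.not_mem_nil)
    · omega
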